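-- pv_equiv track=rewrite | github.com/rphlo/py-retricon | retricon/retricon.py | fill_pixels_cent_sym
-- ===== SOURCE A (Python) =====
-- import math
--
-- def fill_pixels_cent_sym(raw, dimension):
--     mid = int(math.ceil(dimension / 2.0))
--     odd = dimension % 2 != 0
--     pic = [None] * dimension
--     for row in range(dimension):
--         pic[row] = [None] * dimension
--         for col in range(dimension):
--             if col >= mid:
--                 dist_middle = mid - col
--                 if odd:
--                     dist_middle -= 1
--                 dist_middle = abs(dist_middle)
--             if row < mid:
--                 if col < mid:
--                     ii = (row * mid) + col
--                 else:
--                     ii = (row * mid) + mid - 1 - dist_middle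
--             else:
--                 if col < mid:
--                     ii = (dimension - 1 - row) * mid + col
--                 else:
--                     ii = (dimension - 1 - row) * mid + mid - 1 - dist_middle
--             pic[row][col] = raw['pixels'][ii]
--     return pic
-- ===== SOURCE B (Python) =====
-- def fill_pixels_cent_sym(raw, dimension):
--     if dimension <= 0:
--         return []
--     mid = (dimension + 1) // 2
--     odd = dimension % 2 != 0
--     px = raw['pixels']
--     tops = []
--     for r in range(mid):
--         base = [px[r * mid + c] for c in range(mid)]
--         tops.append(base + (base[:-1] if odd else base)[::-1])
--     return tops + (tops[:-1] if odd else tops)[::-1]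
-- ===== Notes on version B (the rewrite author's own statement) =====
-- stated objective: simpler
-- what changed: B builds only the top-left quadrant rows and produces the full grid by mirroring each row horizontally and then mirroring the list of rows vertically (dropping the shared centre row/column when the dimension is odd), instead of A's per-cell branching index arithmetic over all dimension^2 cells.
import Mathlib
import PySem

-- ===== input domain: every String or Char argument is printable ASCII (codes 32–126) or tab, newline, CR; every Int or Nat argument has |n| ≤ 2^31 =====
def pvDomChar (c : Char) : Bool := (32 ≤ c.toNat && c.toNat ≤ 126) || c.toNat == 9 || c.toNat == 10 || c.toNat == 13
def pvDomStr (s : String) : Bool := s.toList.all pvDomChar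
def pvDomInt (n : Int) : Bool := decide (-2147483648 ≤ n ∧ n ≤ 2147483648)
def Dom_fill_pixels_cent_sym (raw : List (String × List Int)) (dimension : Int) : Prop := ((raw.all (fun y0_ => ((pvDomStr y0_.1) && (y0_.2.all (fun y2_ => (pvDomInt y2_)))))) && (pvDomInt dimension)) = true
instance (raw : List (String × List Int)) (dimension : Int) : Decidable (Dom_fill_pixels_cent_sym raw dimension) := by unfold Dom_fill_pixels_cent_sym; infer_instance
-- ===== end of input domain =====

-- B builds the top-left quadrant and mirrors it horizontally then vertically, instead of A's
-- per-cell branching index arithmetic; objective: simpler.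

-- ===== PORT A =====
def fill_pixels_cent_sym (raw : List (String × List Int)) (dimension : Int) : List (List Int) :=
  -- int(math.ceil(dimension / 2.0)) = (dimension + 1) // 2, exact for |dimension| ≤ 2^31
  let mid : Int := PySem.Int.floordiv (dimension + 1) 2
  let odd : Bool := PySem.Int.mod dimension 2 != 0
  (PySem.List.pyRange 0 dimension 1).map (fun row =>
    (PySem.List.pyRange 0 dimension 1).map (fun col =>
      -- dist_middle is only read in branches where col >= mid (as in the Python)
      let dist_middle : Int :=
        if mid ≤ col then |(mid - col) - (if odd then 1 else 0)| else 0
      let ii : Int :=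
        if row < mid then
          if col < mid then row * mid + col
          else row * mid + mid - 1 - dist_middle
        else
          if col < mid then (dimension - 1 - row) * mid + col
          else (dimension - 1 - row) * mid + mid - 1 - dist_middle
      PySem.List.pyGetD (((PySem.Dict.mk raw).get? "pixels").getD []) ii 0))

-- ===== PORT B =====
def fill_pixels_cent_sym_alt (raw : List (String × List Int)) (dimension : Int) : List (List Int) :=
  if dimension ≤ 0 then []
  else
    let mid : Int := PySem.Int.floordiv (dimension + 1) 2
    let odd : Bool := PySem.Int.mod dimension 2 != 0
    let px : List Int := ((PySem.Dict.mk raw).get? "pixels").getD []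
    let tops : List (List Int) := (PySem.List.pyRange 0 mid 1).map (fun r =>
      let base : List Int := (PySem.List.pyRange 0 mid 1).map (fun c =>
        PySem.List.pyGetD px (r * mid + c) 0)
      base ++ (if odd then base.dropLast else base).reverse)
    tops ++ (if odd then tops.dropLast else tops).reverse

-- ===== PRECONDITION & SPEC =====
-- Pre_ admits exactly the inputs A returns on: for dimension ≥ 1 the Python indexes
-- raw['pixels'][ii] with 0 ≤ ii ≤ mid²-1, so it raises KeyError when 'pixels' is absent and
-- IndexError when the pixel list is shorter than mid²; for dimension ≤ 0 it returns [].
def Pre_fill_pixels_cent_sym (raw : List (String × List Int)) (dimension : Int) : Prop :=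
  dimension ≤ 0 ∨
    (((PySem.Dict.mk raw).get? "pixels").isSome = true ∧
     PySem.Int.floordiv (dimension + 1) 2 * PySem.Int.floordiv (dimension + 1) 2
       ≤ ((((PySem.Dict.mk raw).get? "pixels").getD []).length : Int))
instance (raw : List (String × List Int)) (dimension : Int) : Decidable (Pre_fill_pixels_cent_sym raw dimension) := by unfold Pre_fill_pixels_cent_sym; infer_instance

def pvWitness_fill_pixels_cent_sym : (List (String × List Int)) × Int := ([("pixels", [1, 2, 3, 4])], 3)

def Spec_fill_pixels_cent_sym (raw : List (String × List Int)) (dimension : Int) (out : List (List Int)) : Prop := out = fill_pixels_cent_sym_alt raw dimension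
instance (raw : List (String × List Int)) (dimension : Int) (out : List (List Int)) : Decidable (Spec_fill_pixels_cent_sym raw dimension out) := by unfold Spec_fill_pixels_cent_sym; infer_instance

-- ===== CLAIM (what is proved, stated in full; the proofs are below) =====
def Claim_equal_fill_pixels_cent_sym : Prop := ∀ (raw : List (String × List Int)) (dimension : Int), Dom_fill_pixels_cent_sym raw dimension → Pre_fill_pixels_cent_sym raw dimension → Spec_fill_pixels_cent_sym raw dimension (fill_pixels_cent_sym raw dimension)

-- ===== LEMMAS AND PROOFS =====

-- effective (quadrant) index of a row/column after central mirroring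
def pvEff (d m i : Nat) : Nat := if i < m then i else d - 1 - i

-- a full top-half row: quadrant row r mirrored horizontally
def pvTop (px : List Int) (d m r : Nat) : List Int :=
  let base := (List.range m).map (fun c => PySem.List.pyGetD px ((r * m + c : Nat) : Int) 0)
  base ++ (if d % 2 = 1 then base.dropLast else base).reverse

-- mirroring a half list reproduces mapping f over the mirrored index
lemma pv_mirror {α : Type} (d m : Nat) (_hd : 0 < d) (hm : m = (d + 1) / 2) (f : Nat → α) :
    (List.range d).map (fun i => f (pvEff d m i)) =
      (List.range m).map f ++
        (if d % 2 = 1 then ((List.range m).map f).dropLast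
         else (List.range m).map f).reverse := by
  by_cases hp : d % 2 = 1
  · rw [if_pos hp]
    apply List.ext_getElem
    · simp; omega
    · intro i h1 h2
      simp only [List.getElem_map, List.getElem_range, pvEff]
      by_cases hi : i < m
      · rw [List.getElem_append_left (by simpa using hi)]
        simp [hi]
      · rw [List.getElem_append_right (by simpa using hi)]
        simp only [List.getElem_reverse, List.getElem_dropLast, List.getElem_map,
          List.getElem_range, List.length_map, List.length_range, List.length_dropLast, if_neg hi]
        congr 1
        omega
  · rw [if_neg hp]
    apply List.ext_getElem
    · simp; omega
    · intro i h1 h2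
      simp only [List.getElem_map, List.getElem_range, pvEff]
      by_cases hi : i < m
      · rw [List.getElem_append_left (by simpa using hi)]
        simp [hi]
      · rw [List.getElem_append_right (by simpa using hi)]
        simp only [List.getElem_reverse, List.getElem_map, List.getElem_range,
          List.length_map, List.length_range, List.length_reverse, if_neg hi]
        congr 1
        omega

-- A's branching index arithmetic computes exactly the mirrored quadrant index
lemma pv_cell_eq (d m : Nat) (hd : 0 < d) (hm : m = (d + 1) / 2) (px : List Int)
    (row col : Nat) (hr : row < d) (hc : col < d) :
    (let dist_middle : Int :=
        if (m : Int) ≤ (col : Int) then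
          |((m : Int) - col) - (if d % 2 = 1 then 1 else 0)| else 0
     let ii : Int :=
        if (row : Int) < m then
          if (col : Int) < m then (row : Int) * m + col
          else (row : Int) * m + m - 1 - dist_middle
        else
          if (col : Int) < m then ((d : Int) - 1 - row) * m + col
          else ((d : Int) - 1 - row) * m + m - 1 - dist_middle
     PySem.List.pyGetD px ii 0) =
      PySem.List.pyGetD px ((pvEff d m row * m + pvEff d m col : Nat) : Int) 0 := by
  have hr1 : ((d - 1 - row : Nat) : Int) = (d : Int) - 1 - row := by omega
  have hc1 : ((d - 1 - col : Nat) : Int) = (d : Int) - 1 - col := by omega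
  simp only [pvEff]
  congr 1
  by_cases hp : d % 2 = 1 <;>
    [rw [if_pos hp]; rw [if_neg hp]] <;>
    split_ifs with h1 h2 h3 <;>
    (try rw [abs_of_nonpos (by omega)]) <;>
    (try push_cast) <;>
    (try simp only [hr1, hc1]) <;>
    omega

-- ===== VERDICT (by name: the statement is the Claim_ definition above) =====
theorem fill_pixels_cent_sym_spec : Claim_equal_fill_pixels_cent_sym := by
  intro raw dimension _hdom _hpre
  unfold Spec_fill_pixels_cent_sym
  by_cases hd : dimension ≤ 0
  · simp [fill_pixels_cent_sym, fill_pixels_cent_sym_alt,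
      PySem.List.pyRange_one_eq_nil hd, hd]
  · rw [not_le] at hd
    obtain ⟨d, rfl⟩ : ∃ d : Nat, dimension = (d : Int) :=
      ⟨dimension.toNat, (Int.toNat_of_nonneg (le_of_lt hd)).symm⟩
    have hdpos : 0 < d := by exact_mod_cast hd
    set m : Nat := (d + 1) / 2 with hm
    have hmid : PySem.Int.floordiv ((d : Int) + 1) 2 = (m : Int) := by
      have h1 : ((d : Int) + 1) = ((d + 1 : Nat) : Int) := by push_cast; ring
      rw [h1]
      exact_mod_cast PySem.Int.floordiv_natCast (d + 1) 2
    have hodd : (PySem.Int.mod (d : Int) 2 != 0) = decide (d % 2 = 1) := by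
      rw [PySem.Int.mod_eq_emod_of_pos (by norm_num)]
      by_cases hp : d % 2 = 1
      · simp only [hp, decide_true, bne_iff_ne, ne_eq]
        omega
      · simp only [hp, decide_false, bne_eq_false_iff_eq]
        omega
    set px : List Int := (((PySem.Dict.mk raw).get? "pixels").getD []) with hpx
    have hrange : PySem.List.pyRange 0 (d : Int) 1 = (List.range d).map (fun k : Nat => (k : Int)) := by
      rw [PySem.List.pyRange_one]
      simp only [sub_zero, Int.toNat_natCast]
      exact List.map_congr_left (fun a _ => zero_add _)
    have hrangem : PySem.List.pyRange 0 (m : Int) 1 = (List.range m).map (fun k : Nat => (k : Int)) := by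
      rw [PySem.List.pyRange_one]
      simp only [sub_zero, Int.toNat_natCast]
      exact List.map_congr_left (fun a _ => zero_add _)
    -- reduce A to a map over Nat ranges of the mirrored quadrant cell
    have hA : fill_pixels_cent_sym raw (d : Int) =
        (List.range d).map (fun row => (List.range d).map (fun col =>
          PySem.List.pyGetD px ((pvEff d m row * m + pvEff d m col : Nat) : Int) 0)) := by
      simp only [fill_pixels_cent_sym, hmid, hodd, hrange, ← hpx, decide_eq_true_eq,
        List.map_map]
      apply List.map_congr_left
      intro row hrow
      rw [List.mem_range] at hrow
      simp only [Function.comp_apply]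
      apply List.map_congr_left
      intro col hcol
      rw [List.mem_range] at hcol
      simp only [Function.comp_apply]
      exact pv_cell_eq d m hdpos hm px row col hrow hcol
    -- reduce B to top rows mirrored vertically
    have htops : (PySem.List.pyRange 0 (m : Int) 1).map (fun r =>
          let base := (PySem.List.pyRange 0 (m : Int) 1).map (fun c =>
            PySem.List.pyGetD px (r * m + c) 0)
          base ++ (if d % 2 = 1 then base.dropLast else base).reverse) =
        (List.range m).map (fun r => pvTop px d m r) := by
      apply List.ext_getElem
      · simp [PySem.List.length_pyRange_one]
      · intro k h1 h2
        simp only [List.getElem_map, List.getElem_range]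
        have hk : k < m := by
          simpa using h2
        have hlen : k < (PySem.List.pyRange 0 (m : Int) 1).length := by
          rw [PySem.List.length_pyRange_one]
          omega
        have hgk : (PySem.List.pyRange 0 (m : Int) 1)[k]'hlen = (k : Int) := by
          rw [PySem.List.getElem_pyRange_one]
          exact zero_add _
        rw [hgk]
        have hbase : (PySem.List.pyRange 0 (m : Int) 1).map (fun c =>
              PySem.List.pyGetD px ((k : Int) * m + c) 0) =
            (List.range m).map (fun c => PySem.List.pyGetD px ((k * m + c : Nat) : Int) 0) := by
          rw [hrangem, List.map_map]
          refine List.map_congr_left (fun c _ => ?_)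
          simp only [Function.comp_apply]
          congr 1
          try push_cast
          try ring
        simp only [hbase, pvTop]
    have hB : fill_pixels_cent_sym_alt raw (d : Int) =
        (List.range m).map (fun r => pvTop px d m r) ++
          (if d % 2 = 1 then ((List.range m).map (fun r => pvTop px d m r)).dropLast
           else (List.range m).map (fun r => pvTop px d m r)).reverse := by
      rw [fill_pixels_cent_sym_alt, if_neg (by exact_mod_cast not_le.mpr hd)]
      simp only [hmid, hodd, ← hpx, decide_eq_true_eq]
      rw [htops]
    rw [hA, hB]
    have hrow : ∀ row ∈ List.range d,
        (List.range d).map (fun col =>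
          PySem.List.pyGetD px ((pvEff d m row * m + pvEff d m col : Nat) : Int) 0) =
          pvTop px d m (pvEff d m row) := by
      intro row _
      simp only [pvTop]
      exact pv_mirror d m hdpos hm
        (fun c => PySem.List.pyGetD px ((pvEff d m row * m + c : Nat) : Int) 0)
    rw [List.map_congr_left hrow]
    exact pv_mirror d m hdpos hm (fun r => pvTop px d m r)
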